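-- pv_equiv track=rewrite | github.com/AkshadC/AI_ML | temp.py | dictwords
-- ===== SOURCE A (Python) =====
-- def dictwords(text_input):
--     counts = dict ()
--     words = text_input.split(" ")
--     for word in words:
--         if word in counts:
--             counts [word]+=1
--         else:
--             counts [word] = 1
--     new_dict = dict()
--     for i in counts:
--         if counts[i] > 1:
--             new_dict[i] = counts[i]
--     result = []
--     sorted_d = dict(sorted(new_dict.items(), key=lambda item: item[0]))
--     for i in sorted_d:
--         result.append(i)
--     if result is not None:
--         return result
--     else:
--         return "NA"
-- ===== SOURCE B (Python) =====
-- def dictwords(text_input):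
--     words = sorted(text_input.split(" "))
--     result = []
--     while words:
--         w = words[0]
--         run = 1
--         while run < len(words) and words[run] == w:
--             run += 1
--         if run > 1:
--             result.append(w)
--         words = words[run:]
--     return result
-- ===== Notes on version B (the rewrite author's own statement) =====
-- stated objective: alternative
-- what changed: Replaces the dict-count pass, dict-filter pass and items-sort with a single sort of the word list followed by one run-length scan that emits each word whose run is longer than 1.
import Mathlib
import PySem

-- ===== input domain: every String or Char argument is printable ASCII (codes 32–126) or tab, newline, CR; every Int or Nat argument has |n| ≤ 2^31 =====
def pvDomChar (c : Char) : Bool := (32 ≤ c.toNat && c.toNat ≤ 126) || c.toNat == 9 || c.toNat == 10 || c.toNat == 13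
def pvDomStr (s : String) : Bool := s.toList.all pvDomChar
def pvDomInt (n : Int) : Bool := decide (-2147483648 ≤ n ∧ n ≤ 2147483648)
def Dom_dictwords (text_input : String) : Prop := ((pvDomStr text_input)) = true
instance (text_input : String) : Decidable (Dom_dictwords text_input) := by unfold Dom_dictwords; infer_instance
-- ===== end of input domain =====

-- B replaces A's count-dict / filter-dict / sort-items pipeline by one sort of the word list
-- followed by a single run-length scan (alternative algorithm, similar cost).

-- ===== PORT A =====
-- the whole body of A after `words = text_input.split(" ")`, as a function of the word list
def pvDictA (words : List String) : List String :=
  let counts : PySem.Dict String Int :=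
    words.foldl
      (fun d word => if d.contains word then d.insert word (d.getD word 0 + 1) else d.insert word 1)
      PySem.Dict.empty
  let new_dict : PySem.Dict String Int :=
    counts.keys.foldl
      (fun nd i => if counts.getD i 0 > 1 then nd.insert i (counts.getD i 0) else nd)
      PySem.Dict.empty
  let sorted_d : PySem.Dict String Int :=
    PySem.Dict.ofList (PySem.List.sorted new_dict.items (fun item => item.1) false)
  let result : List String := sorted_d.keys.foldl (fun acc i => acc ++ [i]) []
  -- `if result is not None` is always the then-branch: result is a list
  result

-- sep " " is nonempty so split? is always `some`
def dictwords (text_input : String) : List String :=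
  pvDictA ((PySem.Str.split? text_input " ").getD [])

-- ===== PORT B =====
-- the outer while-loop of B: pop the run of the first word, emit it if the run length > 1
def pvRunScan : List String → List String
  | [] => []
  | w :: rest =>
    let run := 1 + (rest.takeWhile (fun x => x == w)).length
    (if run > 1 then [w] else []) ++ pvRunScan (rest.dropWhile (fun x => x == w))
termination_by l => l.length
decreasing_by
  simp only [List.length_cons]
  exact Nat.lt_succ_of_le (List.length_dropWhile_le _ _)

def dictwords_alt (text_input : String) : List String :=
  pvRunScan (PySem.List.sorted ((PySem.Str.split? text_input " ").getD []) (fun x => x) false)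

-- ===== PRECONDITION & SPEC =====
def Spec_dictwords (text_input : String) (out : List String) : Prop := out = dictwords_alt text_input
instance (text_input : String) (out : List String) : Decidable (Spec_dictwords text_input out) := by unfold Spec_dictwords; infer_instance

-- ===== CLAIM (what is proved, stated in full; the proofs are below) =====
def Claim_equal_dictwords : Prop := ∀ (text_input : String), Dom_dictwords text_input → Spec_dictwords text_input (dictwords text_input)

-- ===== LEMMAS AND PROOFS =====

-- A's first loop is the standard counter
theorem pvCounts_eq (ws : List String) :
    ws.foldl
      (fun d word => if d.contains word then d.insert word (d.getD word 0 + 1) else d.insert word 1)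
      PySem.Dict.empty = PySem.Dict.counter ws := by
  have h : (fun (d : PySem.Dict String Int) (word : String) =>
      if d.contains word then d.insert word (d.getD word 0 + 1) else d.insert word 1)
      = fun d word => d.insert word (d.getD word 0 + 1) := by
    funext d word
    by_cases hc : d.contains word
    · simp [hc]
    · simp only [Bool.not_eq_true] at hc
      simp [hc, PySem.Dict.getD_of_not_contains d 0 hc]
  rw [h, PySem.Dict.foldl_insert_getD_add_one_eq_counter]

-- A's second loop, over fresh distinct keys, just appends the filtered items
theorem pvFilterLoop_items (f : String → Int) :
    ∀ (ks : List String) (nd : PySem.Dict String Int), ks.Nodup →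
      (∀ i ∈ ks, nd.contains i = false) →
      (ks.foldl (fun nd i => if f i > 1 then nd.insert i (f i) else nd) nd).items
        = nd.items ++ (ks.filter (fun i => decide (f i > 1))).map (fun i => (i, f i))
  | [], nd, _, _ => by simp
  | k :: ks, nd, hnd, hfresh => by
    have hk : nd.contains k = false := hfresh k (List.mem_cons_self)
    have hnodup := (List.nodup_cons.mp hnd)
    by_cases h1 : f k > 1
    · have hfresh' : ∀ i ∈ ks, (nd.insert k (f k)).contains i = false := by
        intro i hi
        rw [PySem.Dict.contains_insert]
        have : i ≠ k := fun he => hnodup.1 (he ▸ hi)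
        simp [this, hfresh i (List.mem_cons_of_mem _ hi)]
      simp only [List.foldl_cons, if_pos h1, List.filter_cons, decide_eq_true h1]
      rw [pvFilterLoop_items f ks _ hnodup.2 hfresh',
        PySem.Dict.items_insert_of_not_contains nd (f k) hk]
      simp
    · simp only [List.foldl_cons, if_neg h1, List.filter_cons]
      rw [pvFilterLoop_items f ks _ hnodup.2 (fun i hi => hfresh i (List.mem_cons_of_mem _ hi))]
      simp [h1]

-- elements surviving dropWhile (== w) in a sorted tail are strictly greater than w
theorem pvDrop_gt (w : String) :
    ∀ (rest : List String), rest.Pairwise (· ≤ ·) → (∀ x ∈ rest, w ≤ x) →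
      ∀ x ∈ rest.dropWhile (fun x => x == w), w < x
  | [], _, _ => by simp
  | a :: t, hpw, hle => by
    by_cases ha : (a == w) = true
    · rw [show List.dropWhile (fun x => x == w) (a :: t) = List.dropWhile (fun x => x == w) t from by simp [ha]]
      exact pvDrop_gt w t (List.Pairwise.sublist (List.sublist_cons_self a t) hpw)
        (fun x hx => hle x (List.mem_cons_of_mem _ hx))
    · rw [show List.dropWhile (fun x => x == w) (a :: t) = a :: t from by simp [ha]]
      have haw : w < a := lt_of_le_of_ne (hle a List.mem_cons_self)
        (fun he => ha (by simp [he.symm]))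
      intro x hx
      rcases List.mem_cons.mp hx with rfl | hx
      · exact haw
      · exact lt_of_lt_of_le haw ((List.pairwise_cons.mp hpw).1 x hx)

-- characterisation of B's scan on a sorted list: membership and strict order
theorem pvRunScan_spec : ∀ (l : List String), l.Pairwise (· ≤ ·) →
    (∀ x, x ∈ pvRunScan l ↔ x ∈ l ∧ 1 < l.count x) ∧ (pvRunScan l).Pairwise (· < ·) := by
  intro l
  induction l using pvRunScan.induct with
  | case1 => simp [pvRunScan]
  | case2 w rest ih =>
    intro hpw
    have hpwt : rest.Pairwise (· ≤ ·) := (List.pairwise_cons.mp hpw).2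
    have hlet : ∀ x ∈ rest, w ≤ x := (List.pairwise_cons.mp hpw).1
    set p : String → Bool := fun x => x == w with hp
    have hsplit : rest.takeWhile p ++ rest.dropWhile p = rest := List.takeWhile_append_dropWhile
    have htake : ∀ x ∈ rest.takeWhile p, x = w := by
      intro x hx
      have := List.mem_takeWhile_imp hx
      simpa [hp] using this
    have hdrop : ∀ x ∈ rest.dropWhile p, w < x := pvDrop_gt w rest hpwt hlet
    have hdpw : (rest.dropWhile p).Pairwise (· ≤ ·) :=
      List.Pairwise.sublist (List.dropWhile_sublist p) hpwt
    obtain ⟨ihmem, ihpw⟩ := ih hdpw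
    have hcountw : (w :: rest).count w = 1 + (rest.takeWhile p).length := by
      have hr : rest.count w = (rest.takeWhile p).count w + (rest.dropWhile p).count w := by
        conv_lhs => rw [← hsplit]
        rw [List.count_append]
      have h1 : (rest.takeWhile p).count w = (rest.takeWhile p).length :=
        List.count_eq_length.mpr (fun b hb => (htake b hb).symm)
      have h2 : (rest.dropWhile p).count w = 0 :=
        List.count_eq_zero.mpr (fun hmem => lt_irrefl w (hdrop w hmem))
      rw [List.count_cons_self]
      omega
    have hcountx : ∀ x, x ≠ w → (w :: rest).count x = (rest.dropWhile p).count x := by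
      intro x hx
      have hr : rest.count x = (rest.takeWhile p).count x + (rest.dropWhile p).count x := by
        conv_lhs => rw [← hsplit]
        rw [List.count_append]
      have h1 : (rest.takeWhile p).count x = 0 :=
        List.count_eq_zero.mpr (fun hmem => hx (htake x hmem))
      rw [List.count_cons]
      simp only [beq_iff_eq]
      rw [if_neg (Ne.symm hx)]
      omega
    have hwd : w ∉ rest.dropWhile p := fun hmem => lt_irrefl w (hdrop w hmem)
    have hscan : pvRunScan (w :: rest)
        = (if 1 + (rest.takeWhile p).length > 1 then [w] else []) ++ pvRunScan (rest.dropWhile p) := by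
      rw [pvRunScan]
    constructor
    · intro x
      rw [hscan]
      by_cases hxw : x = w
      · subst hxw
        have hnomem : x ∉ pvRunScan (rest.dropWhile p) := fun hm => hwd ((ihmem x).mp hm).1
        simp only [List.mem_append, hnomem, or_false]
        constructor
        · intro hx
          split at hx
          · next hgt => exact ⟨List.mem_cons_self, by rw [hcountw]; omega⟩
          · simp at hx
        · rintro ⟨-, hc⟩
          rw [hcountw] at hc
          rw [if_pos (show 1 + (rest.takeWhile p).length > 1 by omega)]
          simp
      · have hxmem : x ∈ w :: rest ↔ x ∈ rest.dropWhile p := by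
          constructor
          · intro hx
            rcases List.mem_cons.mp hx with rfl | hx
            · exact absurd rfl hxw
            · rw [← hsplit] at hx
              rcases List.mem_append.mp hx with h | h
              · exact absurd (htake x h) hxw
              · exact h
          · intro hx
            exact List.mem_cons_of_mem _ (hsplit ▸ List.mem_append_right _ hx)
        have : x ∉ (if 1 + (rest.takeWhile p).length > 1 then [w] else []) := by
          split <;> simp [hxw]
        simp only [List.mem_append, this, false_or, ihmem x, hxmem, hcountx x hxw]
    · rw [hscan]
      split
      · simp only [List.cons_append, List.nil_append, List.pairwise_cons]
        exact ⟨fun y hy => hdrop y ((ihmem y).mp hy).1, ihpw⟩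
      · simpa using ihpw

-- keys of a dict built from a pair list are the distinct first components
theorem pvKeys_ofList (l : List (String × Int)) :
    (PySem.Dict.ofList l).keys = PySem.Set.ofList (l.map (fun p => p.1)) := by
  rw [show PySem.Dict.ofList l = l.foldl (fun d p => d.insert p.1 p.2) PySem.Dict.empty from rfl]
  rw [PySem.Dict.keys_foldl_insert_key l (fun p => p.1) (fun _ p => p.2)]
  simp [PySem.Dict.keys_empty, PySem.Set.update_nil_left]

-- the pipeline of A equals the scan of B, for any word list
theorem pvMain (ws : List String) :
    pvDictA ws = pvRunScan (PySem.List.sorted ws (fun x => x) false) := by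
  have hl : (PySem.List.sorted ws (fun x => x) false).Pairwise (· ≤ ·) := by
    simpa using PySem.List.sorted_pairwise ws (fun x => x)
  obtain ⟨hBmem, hBpw⟩ := pvRunScan_spec (PySem.List.sorted ws (fun x => x) false) hl
  set B : List String := pvRunScan (PySem.List.sorted ws (fun x => x) false) with hB
  simp only [pvDictA]
  rw [pvCounts_eq ws, PySem.Dict.keys_counter ws]
  rw [pvFilterLoop_items (fun i => (PySem.Dict.counter ws).getD i 0) (PySem.Set.ofList ws)
    PySem.Dict.empty (PySem.Set.nodup_ofList ws) (fun i _ => PySem.Dict.contains_empty i)]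
  simp only [PySem.Dict.getD_counter]
  have hempty : (PySem.Dict.empty : PySem.Dict String Int).items = [] := rfl
  rw [hempty, List.nil_append]
  set F : List String := (PySem.Set.ofList ws).filter (fun i => decide ((List.count i ws : Int) > 1)) with hF
  set M : List (String × Int) := F.map (fun i => (i, (List.count i ws : Int))) with hM
  -- B is a permutation of F
  have hBnd : B.Nodup := hBpw.imp (fun h => ne_of_lt h)
  have hFnd : F.Nodup := (PySem.Set.nodup_ofList ws).filter _
  have hBF : B.Perm F := by
    rw [List.perm_ext_iff_of_nodup hBnd hFnd]
    intro a
    rw [hBmem a, hF, List.mem_filter]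
    have h1 : a ∈ PySem.List.sorted ws (fun x => x) false ↔ a ∈ ws :=
      PySem.List.mem_sorted ws (fun x => x) false a
    have h2 : (PySem.List.sorted ws (fun x => x) false).count a = ws.count a :=
      (PySem.List.sorted_perm ws (fun x => x) false).count_eq a
    rw [h1, h2, PySem.Set.mem_ofList]
    have h3 : (decide ((List.count a ws : Int) > 1) = true) ↔ 1 < ws.count a := by
      rw [decide_eq_true_eq]
      exact_mod_cast Iff.rfl
    rw [h3]
  -- the sorted filtered items are exactly B paired with the counts
  have hsorted : PySem.List.sorted M (fun item => item.1) false
      = B.map (fun w => (w, (List.count w ws : Int))) := by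
    apply PySem.List.sorted_eq_of_perm_of_pairwise_lt
    · rw [hM]
      exact hBF.map _
    · exact List.Pairwise.map _ (fun a b h => h) hBpw
  rw [hsorted, pvKeys_ofList]
  rw [PySem.List.foldl_append_singleton_eq_self]
  rw [List.map_map]
  rw [show ((fun (p : String × Int) => p.1) ∘ fun w => (w, (List.count w ws : Int))) = id from rfl]
  rw [List.map_id, List.nil_append]
  exact PySem.Set.ofList_eq_self_of_nodup B hBnd

-- ===== VERDICT (by name: the statement is the Claim_ definition above) =====
theorem dictwords_spec : Claim_equal_dictwords := by
  intro text_input _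
  unfold Spec_dictwords dictwords dictwords_alt
  exact pvMain _
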